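-- pv_equiv track=rewrite | github.com/glebkuznetsov/nucleic | nucleic/filters.py | at_run
-- ===== SOURCE A (Python) =====
-- def at_run(seq, run_length):
--     ''' Return True of seq has a maximum AT run length <= run_length
--     '''
--     lrun = 0
--     for b in seq:
--         if b in 'AT':
--             lrun += 1
--             if lrun > run_length:
--                 return False
--         else:
--             lrun = 0
--     return True
-- ===== SOURCE B (Python) =====
-- def at_run(seq, run_length):
--     ''' Return True of seq has a maximum AT run length <= run_length '''
--     n = len(seq)
--     # positions of separator (non-AT) characters
--     bounds = [i for i, b in enumerate(seq) if b not in 'AT']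
--     # gap between consecutive separators (and the sequence ends) = maximal AT-run length
--     gaps = []
--     prev = -1
--     for i in bounds + [n]:
--         gaps.append(i - prev - 1)
--         prev = i
--     return all(g <= run_length for g in gaps if g > 0)
-- ===== Notes on version B (the rewrite author's own statement) =====
-- stated objective: alternative
-- what changed: Instead of a counter-with-reset scan, B first builds the index list of non-AT separator positions, derives each maximal AT-run length as the gap between consecutive separators, and then checks every positive gap against the threshold.
import Mathlib
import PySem

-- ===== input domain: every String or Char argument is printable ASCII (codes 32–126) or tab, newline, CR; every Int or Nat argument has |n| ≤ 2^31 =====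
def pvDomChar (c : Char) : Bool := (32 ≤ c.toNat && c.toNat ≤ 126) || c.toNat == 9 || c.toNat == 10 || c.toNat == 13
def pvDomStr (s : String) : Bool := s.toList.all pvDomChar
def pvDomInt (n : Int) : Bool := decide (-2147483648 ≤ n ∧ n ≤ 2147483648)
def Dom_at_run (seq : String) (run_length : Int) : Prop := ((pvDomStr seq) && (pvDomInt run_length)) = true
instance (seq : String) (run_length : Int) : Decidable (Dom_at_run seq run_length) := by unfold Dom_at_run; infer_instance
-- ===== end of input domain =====

-- B replaces A's counter/reset scan by a staged algorithm: list the non-AT separator positions,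
-- turn consecutive-separator gaps into maximal AT-run lengths, and check every positive gap; same value, no speed claim.

-- ===== PORT A =====
-- 'b in "AT"' on a single character
def pyInAT (c : Char) : Bool := c = 'A' || c = 'T'

-- the for-loop with early 'return False', as structural recursion over the characters with state lrun
def at_runGo (xs : List Char) (lrun : Int) (run_length : Int) : Bool :=
  match xs with
  | [] => true
  | b :: rest =>
    if pyInAT b then
      if lrun + 1 > run_length then false
      else at_runGo rest (lrun + 1) run_length
    else at_runGo rest 0 run_length

def at_run (seq : String) (run_length : Int) : Bool :=
  at_runGo seq.toList 0 run_length

-- ===== PORT B =====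
-- '[i for i, b in enumerate(seq) if b not in "AT"]': positions of separator characters, index carried as i
def sepPos (xs : List Char) (i : Int) : List Int :=
  match xs with
  | [] => []
  | c :: rest => if pyInAT c then sepPos rest (i + 1) else i :: sepPos rest (i + 1)

-- the loop 'for i in bounds + [n]: gaps.append(i - prev - 1); prev = i'
def gapsFrom (bs : List Int) (prev : Int) : List Int :=
  match bs with
  | [] => []
  | i :: rest => (i - prev - 1) :: gapsFrom rest i

-- 'all(g <= run_length for g in gaps if g > 0)'
def at_run_alt (seq : String) (run_length : Int) : Bool :=
  let n : Int := seq.toList.length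
  let bounds := sepPos seq.toList 0
  let gaps := gapsFrom (bounds ++ [n]) (-1)
  (gaps.filter (fun g => decide (0 < g))).all (fun g => decide (g ≤ run_length))

-- ===== PRECONDITION & SPEC =====
def Spec_at_run (seq : String) (run_length : Int) (out : Bool) : Prop := out = at_run_alt seq run_length
instance (seq : String) (run_length : Int) (out : Bool) : Decidable (Spec_at_run seq run_length out) := by unfold Spec_at_run; infer_instance

-- ===== CLAIM =====
def Claim_equal_at_run : Prop := ∀ (seq : String) (run_length : Int), Dom_at_run seq run_length → Spec_at_run seq run_length (at_run seq run_length)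

-- ===== LEMMAS AND PROOFS =====

-- the filtered all-check B performs on a gap list
def gapsOK (gs : List Int) (rl : Int) : Bool :=
  (gs.filter (fun g => decide (0 < g))).all (fun g => decide (g ≤ rl))

lemma gapsOK_cons (g : Int) (gs : List Int) (rl : Int) :
    gapsOK (g :: gs) rl = ((!(decide (0 < g)) || decide (g ≤ rl)) && gapsOK gs rl) := by
  by_cases h : 0 < g <;> simp [gapsOK, h]

-- the separator-positions-plus-end list is nonempty and its head is ≥ the starting index
lemma sepList_head (xs : List Char) (i : Int) :
    ∃ a rest, sepPos xs i ++ [i + (xs.length : Int)] = a :: rest ∧ i ≤ a := by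
  cases xs with
  | nil => exact ⟨i, [], by simp [sepPos], le_refl i⟩
  | cons c rest =>
    by_cases h : pyInAT c = true
    · obtain ⟨a, rs, he, ha⟩ := sepList_head rest (i + 1)
      refine ⟨a, rs, ?_, by omega⟩
      simp only [sepPos, h, if_true, List.length_cons]
      push_cast
      rw [show i + ((rest.length : Int) + 1) = (i + 1) + (rest.length : Int) by ring]
      exact he
    · refine ⟨i, sepPos rest (i + 1) ++ [i + (((rest.length : Int)) + 1)], ?_, le_refl i⟩
      simp only [sepPos, h, if_false, List.length_cons, List.cons_append]
      push_cast
      rfl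

lemma go_eq_gaps (xs : List Char) (rl : Int) : ∀ (i lrun : Int), 0 ≤ lrun → (lrun = 0 ∨ lrun ≤ rl) →
    at_runGo xs lrun rl = gapsOK (gapsFrom (sepPos xs i ++ [i + (xs.length : Int)]) (i - 1 - lrun)) rl := by
  induction xs with
  | nil =>
    intro i lrun h0 hok
    have hg : lrun ≤ rl ∨ ¬ (0 < lrun) := by omega
    have hfix : i + ((List.length ([] : List Char) : Int)) - (i - 1 - lrun) - 1 = lrun := by
      simp; ring
    simp only [at_runGo, sepPos, List.nil_append, gapsFrom]
    rw [gapsOK_cons, hfix]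
    rcases hg with h | h <;> simp [gapsOK, h]
  | cons c rest ih =>
    intro i lrun h0 hok
    by_cases hc : pyInAT c = true
    · have hlist : sepPos (c :: rest) i ++ [i + ((c :: rest).length : Int)]
          = sepPos rest (i + 1) ++ [(i + 1) + (rest.length : Int)] := by
        simp only [sepPos, hc, if_true, List.length_cons]
        push_cast
        rw [show i + ((rest.length : Int) + 1) = (i + 1) + (rest.length : Int) by ring]
      by_cases hbig : lrun + 1 > rl
      · -- A returns False; B's first gap is ≥ lrun+1 > rl and > 0, so the check fails
        obtain ⟨a, rs, he, ha⟩ := sepList_head rest (i + 1)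
        have e1 : at_runGo (c :: rest) lrun rl = false := by
          simp [at_runGo, hc, hbig]
        rw [e1, hlist, he]
        have h1 : 0 < a - (i - 1 - lrun) - 1 := by omega
        have h2 : ¬ (a - (i - 1 - lrun) - 1 ≤ rl) := by omega
        rw [show gapsFrom (a :: rs) (i - 1 - lrun)
              = (a - (i - 1 - lrun) - 1) :: gapsFrom rs a from rfl, gapsOK_cons,
           decide_eq_true h1, decide_eq_false h2]
        simp
      · have e1 : at_runGo (c :: rest) lrun rl = at_runGo rest (lrun + 1) rl := by
          simp [at_runGo, hc, hbig]
        rw [e1, hlist, ih (i + 1) (lrun + 1) (by omega) (by omega)]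
        congr 2
        ring
    · have hcf : pyInAT c = false := by revert hc; cases pyInAT c <;> simp
      have hlist : sepPos (c :: rest) i ++ [i + ((c :: rest).length : Int)]
          = i :: (sepPos rest (i + 1) ++ [(i + 1) + (rest.length : Int)]) := by
        simp only [sepPos, hcf, List.length_cons]
        push_cast
        rw [show i + ((rest.length : Int) + 1) = (i + 1) + (rest.length : Int) by ring]
        rfl
      have e1 : at_runGo (c :: rest) lrun rl = at_runGo rest 0 rl := by
        simp [at_runGo, hcf]
      rw [e1, hlist]
      simp only [gapsFrom, gapsOK_cons]
      have hfirst : i - (i - 1 - lrun) - 1 = lrun := by ring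
      have hg : lrun ≤ rl ∨ ¬ (0 < lrun) := by omega
      have hhead : (!(decide (0 < i - (i - 1 - lrun) - 1)) || decide (i - (i - 1 - lrun) - 1 ≤ rl)) = true := by
        rw [hfirst]; rcases hg with h | h <;> simp [h]
      rw [hhead, Bool.true_and, ih (i + 1) 0 (by omega) (by omega)]
      congr 2
      ring

-- ===== VERDICT =====
theorem at_run_spec : Claim_equal_at_run := by
  intro seq rl _
  show at_run seq rl = at_run_alt seq rl
  unfold at_run at_run_alt
  rw [go_eq_gaps seq.toList rl 0 0 (le_refl 0) (Or.inl rfl)]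
  simp [gapsOK]
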